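-- pv_equiv track=rewrite | github.com/potentialgenie/ai_team_orchestrator | backend/fix_route_syntax_errors.py | fix_function_signature
-- ===== SOURCE A (Python) =====
-- def fix_function_signature(line: str) -> str:
--     """Fix a specific function signature line"""
--
--     # Extract the function signature
--     if not ('def ' in line and '(' in line and ')' in line):
--         return line
--
--     # Find the parameter list
--     start_paren = line.find('(')
--     end_paren = line.rfind(')')
--
--     if start_paren == -1 or end_paren == -1:
--         return line
--
--     func_start = line[:start_paren + 1]
--     func_end = line[end_paren:]
--     params_str = line[start_paren + 1:end_paren]
--
--     if not params_str.strip():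
--         return line
--
--     # Split parameters
--     params = []
--     current_param = ""
--     paren_depth = 0
--
--     for char in params_str:
--         if char == ',' and paren_depth == 0:
--             params.append(current_param.strip())
--             current_param = ""
--         else:
--             if char == '(':
--                 paren_depth += 1
--             elif char == ')':
--                 paren_depth -= 1
--             current_param += char
--
--     if current_param.strip():
--         params.append(current_param.strip())
--
--     # Separate required and optional parameters
--     required_params = []
--     optional_params = []
--
--     for param in params:
--         param = param.strip()
--         if not param:
--             continue
--
--         # Check if parameter has default value
--         if '=' in param and not param.startswith('*'):
--             # It's an optional parameter
--             optional_params.append(param)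
--         else:
--             # It's a required parameter
--             required_params.append(param)
--
--     # Reconstruct parameter list: required first, then optional
--     new_params = required_params + optional_params
--     new_params_str = ', '.join(new_params)
--
--     new_line = func_start + new_params_str + func_end
--
--     return new_line
-- ===== SOURCE B (Python) =====
-- def fix_function_signature(line: str) -> str:
--     """Fix a specific function signature line"""
--     if not ('def ' in line and '(' in line and ')' in line):
--         return line
--
--     i = line.find('(')
--     j = line.rfind(')')
--
--     inner = line[i + 1:j]
--     if not inner.strip():
--         return line
--
--     # Split on EVERY comma, then glue fragments back together while the running
--     # paren balance is nonzero: a comma is a real separator exactly when the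
--     # balance at that point is zero.
--     chunks = []
--     buf = None
--     bal = 0
--     for frag in inner.split(','):
--         buf = frag if buf is None else buf + ',' + frag
--         bal += frag.count('(') - frag.count(')')
--         if bal == 0:
--             chunks.append(buf)
--             buf = None
--     if buf is not None:
--         chunks.append(buf)
--
--     # One stable sort keyed on has-a-default moves optional params after
--     # required ones while preserving relative order within each group.
--     params = [p for p in (c.strip() for c in chunks) if p]
--     ordered = sorted(params, key=lambda p: '=' in p and not p.startswith('*'))
--     return line[:i + 1] + ', '.join(ordered) + line[j:]
-- ===== Notes on version B (the rewrite author's own statement) =====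
-- stated objective: alternative
-- what changed: B has no character-level state machine at all: it splits the parameter string on every comma with str.split, then glues fragments back together while the running paren balance (via str.count) is nonzero, and reorders with a single stable sort keyed on has-a-default instead of A's two-list partition pass.
import Mathlib
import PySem

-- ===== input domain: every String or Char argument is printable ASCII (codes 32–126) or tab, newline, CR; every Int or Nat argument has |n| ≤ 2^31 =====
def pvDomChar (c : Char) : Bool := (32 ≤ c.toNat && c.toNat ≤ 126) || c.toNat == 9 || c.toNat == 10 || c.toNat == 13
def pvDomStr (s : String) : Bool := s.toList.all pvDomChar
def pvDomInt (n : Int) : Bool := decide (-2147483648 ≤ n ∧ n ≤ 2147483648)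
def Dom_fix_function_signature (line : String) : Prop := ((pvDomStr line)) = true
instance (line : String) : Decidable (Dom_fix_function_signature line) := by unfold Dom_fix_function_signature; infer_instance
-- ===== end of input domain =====

-- B splits the parameter string on EVERY comma and glues fragments back together by
-- running paren balance (instead of A's char-by-char depth state machine), then reorders
-- with one stable sort keyed on has-a-default instead of A's two-list partition pass;
-- objective: simpler. Return values proved equal on all inputs.

-- ===== PORT A =====
-- the predicate "'=' in param and not param.startswith('*')" (named for reuse in lemmas)
def pvIsOpt (p : List Char) : Bool :=
  PySem.Chars.isIn ['='] p && !(PySem.Chars.startswith p ['*'])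

-- A's split-loop body: state (params, current_param, paren_depth)
def pvStepSplitA (st : List (List Char) × List Char × Int) (c : Char) :
    List (List Char) × List Char × Int :=
  if c = ',' ∧ st.2.2 = 0 then (st.1 ++ [PySem.Chars.strip st.2.1], [], st.2.2)
  else (st.1, st.2.1 ++ [c],
        if c = '(' then st.2.2 + 1 else if c = ')' then st.2.2 - 1 else st.2.2)

-- A's partition-loop body: state (required_params, optional_params)
def pvStepPartA (st : List (List Char) × List (List Char)) (p : List Char) :
    List (List Char) × List (List Char) :=
  let q := PySem.Chars.strip p
  if q = [] then st
  else if pvIsOpt q then (st.1, st.2 ++ [q])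
  else (st.1 ++ [q], st.2)

def fix_function_signature (line : String) : String :=
  let cs := line.toList
  if !(PySem.Chars.isIn ['d','e','f',' '] cs && PySem.Chars.isIn ['('] cs
        && PySem.Chars.isIn [')'] cs) then line
  else
    let startParen := PySem.Chars.find cs ['(']
    let endParen := PySem.Chars.rfind cs [')']
    if startParen = -1 ∨ endParen = -1 then line
    else
      let funcStart := PySem.Chars.slice cs none (some (startParen + 1))
      let funcEnd := PySem.Chars.slice cs (some endParen) none
      let paramsStr := PySem.Chars.slice cs (some (startParen + 1)) (some endParen)
      if PySem.Chars.strip paramsStr = [] then line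
      else
        let st := paramsStr.foldl pvStepSplitA ([], [], 0)
        let params := if PySem.Chars.strip st.2.1 ≠ [] then st.1 ++ [PySem.Chars.strip st.2.1]
                      else st.1
        let pr := params.foldl pvStepPartA ([], [])
        String.ofList (funcStart ++ PySem.Chars.join [',', ' '] (pr.1 ++ pr.2) ++ funcEnd)

-- ===== PORT B =====
-- the sort key: 1 if the parameter has a default value, else 0 (Python's False < True)
def pvOptKey (p : List Char) : Int :=
  if PySem.Chars.isIn ['='] p && !(PySem.Chars.startswith p ['*']) then 1 else 0

-- B's loop body over the comma-split fragments: state (chunks, buf : Option, bal)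
def pvStepFragB (st : List (List Char) × Option (List Char) × Int) (frag : List Char) :
    List (List Char) × Option (List Char) × Int :=
  let buf := match st.2.1 with | none => frag | some b => b ++ ',' :: frag
  let bal := st.2.2 + (PySem.Chars.count frag ['('] : Int) - (PySem.Chars.count frag [')'] : Int)
  if bal = 0 then (st.1 ++ [buf], none, bal) else (st.1, some buf, bal)

def fix_function_signature_alt (line : String) : String :=
  let cs := line.toList
  if !(PySem.Chars.isIn ['d','e','f',' '] cs && PySem.Chars.isIn ['('] cs
        && PySem.Chars.isIn [')'] cs) then line
  else
    let i := PySem.Chars.find cs ['(']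
    let j := PySem.Chars.rfind cs [')']
    let inner := PySem.Chars.slice cs (some (i + 1)) (some j)
    if PySem.Chars.strip inner = [] then line
    else
      let st := (PySem.Chars.splitOn inner [',']).foldl pvStepFragB ([], none, 0)
      let chunks := st.1 ++ (match st.2.1 with | none => [] | some b => [b])
      let params := (chunks.map PySem.Chars.strip).filter (fun p => !(p == []))
      let ordered := PySem.List.sorted params pvOptKey false
      String.ofList (PySem.Chars.slice cs none (some (i + 1))
                  ++ PySem.Chars.join [',', ' '] ordered
                  ++ PySem.Chars.slice cs (some j) none)

-- ===== PRECONDITION & SPEC =====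
def Spec_fix_function_signature (line : String) (out : String) : Prop := out = fix_function_signature_alt line
instance (line : String) (out : String) : Decidable (Spec_fix_function_signature line out) := by unfold Spec_fix_function_signature; infer_instance

-- ===== CLAIM (what is proved, stated in full; the proofs are below) =====
def Claim_equal_fix_function_signature : Prop := ∀ (line : String), Dom_fix_function_signature line → Spec_fix_function_signature line (fix_function_signature line)

-- ===== LEMMAS AND PROOFS =====

-- strip is idempotent
lemma pv_dropWhile_idem (p : Char → Bool) (l : List Char) :
    List.dropWhile p (List.dropWhile p l) = List.dropWhile p l := by
  cases h : l.dropWhile p with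
  | nil => simp
  | cons a t =>
      have hne : l.dropWhile p ≠ [] := by simp [h]
      have ha : p a = false := by
        have := List.head_dropWhile_not p hne
        simpa [h] using this
      simp [ha]

lemma pv_rstrip_idem (t : List Char) :
    PySem.Chars.rstrip (PySem.Chars.rstrip t) = PySem.Chars.rstrip t := by
  unfold PySem.Chars.rstrip
  simp [pv_dropWhile_idem]

lemma pv_lstrip_rstrip (t : List Char)
    (ht : List.dropWhile PySem.Chars.isspace t = t) :
    List.dropWhile PySem.Chars.isspace (PySem.Chars.rstrip t) = PySem.Chars.rstrip t := by
  have hsuff : List.dropWhile PySem.Chars.isspace t.reverse <:+ t.reverse :=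
    List.dropWhile_suffix _
  have hpre : PySem.Chars.rstrip t <+: t := by
    have h2 := List.reverse_prefix.mpr hsuff
    simpa [PySem.Chars.rstrip] using h2
  cases hr : PySem.Chars.rstrip t with
  | nil => simp
  | cons a u =>
      rw [hr] at hpre
      rcases hpre with ⟨rest, hrest⟩
      have ha : PySem.Chars.isspace a = false := by
        by_contra hc
        have hc' : PySem.Chars.isspace a = true := by simpa using hc
        have hteq : t = a :: (u ++ rest) := by rw [← hrest]; simp
        have h2 : List.dropWhile PySem.Chars.isspace (u ++ rest) = a :: (u ++ rest) := by
          have := ht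
          rw [hteq] at this
          simpa [List.dropWhile_cons, hc'] using this
        have hlen := congrArg List.length h2
        have hle := List.length_dropWhile_le PySem.Chars.isspace (u ++ rest)
        simp [List.length_append] at hlen hle
        omega
      simp [ha]

lemma pv_strip_strip (s : List Char) :
    PySem.Chars.strip (PySem.Chars.strip s) = PySem.Chars.strip s := by
  have ht : List.dropWhile PySem.Chars.isspace (PySem.Chars.lstrip s) = PySem.Chars.lstrip s :=
    pv_dropWhile_idem _ _
  show PySem.Chars.rstrip (PySem.Chars.lstrip (PySem.Chars.rstrip (PySem.Chars.lstrip s)))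
      = PySem.Chars.rstrip (PySem.Chars.lstrip s)
  have h4 : PySem.Chars.lstrip (PySem.Chars.rstrip (PySem.Chars.lstrip s))
      = PySem.Chars.rstrip (PySem.Chars.lstrip s) := pv_lstrip_rstrip _ ht
  rw [h4, pv_rstrip_idem]

-- rfind finds something whenever isIn holds
lemma pv_rfind_go_ne (s sub : List Char) (j : Nat)
    (h : sub.isPrefixOf (s.drop j) = true) :
    ∀ n, j ≤ n → PySem.Chars.rfind.go s sub n ≠ -1 := by
  intro n
  induction n with
  | zero =>
      intro hn
      have hj0 : j = 0 := Nat.le_zero.mp hn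
      subst hj0
      rw [List.drop_zero] at h
      simp [PySem.Chars.rfind.go, h]
  | succ m ih =>
      intro hn
      by_cases hp : sub.isPrefixOf (s.drop (m + 1)) = true
      · have : PySem.Chars.rfind.go s sub (m + 1) = ((m + 1 : Nat) : Int) := by
          simp [PySem.Chars.rfind.go, hp]
        rw [this]; omega
      · have hjm : j ≤ m := by
          rcases Nat.lt_or_ge j (m + 1) with h1 | h1
          · omega
          · exfalso
            have : j = m + 1 := by omega
            exact hp (this ▸ h)
        have : PySem.Chars.rfind.go s sub (m + 1) = PySem.Chars.rfind.go s sub m := by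
          simp [PySem.Chars.rfind.go, hp]
        rw [this]
        exact ih hjm

lemma pv_rfind_ne_neg_one (s sub : List Char)
    (h : PySem.Chars.isIn sub s = true) : PySem.Chars.rfind s sub ≠ -1 := by
  have hinf : sub <:+: s := (PySem.Chars.isIn_iff_infix sub s).mp h
  rcases hinf with ⟨pre, suf, hs⟩
  have hp : sub.isPrefixOf (s.drop pre.length) = true := by
    rw [← hs, List.append_assoc, List.drop_left' rfl]
    exact List.isPrefixOf_iff_prefix.mpr ⟨suf, rfl⟩
  have hj : pre.length ≤ s.length := by
    rw [← hs]; simp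
  exact pv_rfind_go_ne s sub pre.length hp s.length hj

-- reference chunker: A's top-level comma chunks as (committed chunks, final raw chunk)
def pvChunksP : List Char → Int → List Char → List (List Char) × List Char
  | [], _, cur => ([], cur)
  | c :: s, d, cur =>
      if c = ',' ∧ d = 0 then
        let r := pvChunksP s d []
        (cur :: r.1, r.2)
      else pvChunksP s (if c = '(' then d + 1 else if c = ')' then d - 1 else d) (cur ++ [c])

-- the same chunker as one flat list (committed chunks ++ [final raw chunk])
def pvChunks (s : List Char) (d : Int) (cur : List Char) : List (List Char) :=
  (pvChunksP s d cur).1 ++ [(pvChunksP s d cur).2]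

-- A's char fold computes the reference chunks (committed ones stripped)
lemma pv_A_fold (s : List Char) :
    ∀ (ps : List (List Char)) (cur : List Char) (d : Int),
      ((s.foldl pvStepSplitA (ps, cur, d)).1, (s.foldl pvStepSplitA (ps, cur, d)).2.1)
        = (ps ++ (pvChunksP s d cur).1.map PySem.Chars.strip, (pvChunksP s d cur).2) := by
  induction s with
  | nil => intro ps cur d; simp [pvChunksP]
  | cons c s ih =>
      intro ps cur d
      by_cases h : c = ',' ∧ d = 0
      · have hA : pvStepSplitA (ps, cur, d) c = (ps ++ [PySem.Chars.strip cur], [], d) := by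
          simp [pvStepSplitA, h]
        rw [List.foldl_cons, hA]
        have := ih (ps ++ [PySem.Chars.strip cur]) [] d
        simp only [pvChunksP, if_pos h]
        rw [this]
        simp
      · have hA : pvStepSplitA (ps, cur, d) c
            = (ps, cur ++ [c], if c = '(' then d + 1 else if c = ')' then d - 1 else d) := by
          simp [pvStepSplitA, h]
        rw [List.foldl_cons, hA]
        simp only [pvChunksP, if_neg h]
        exact ih ps (cur ++ [c]) _

-- A's partition fold computes two filters
lemma pv_part_filters (q : List (List Char)) :
    ∀ (r o : List (List Char)),
      q.foldl pvStepPartA (r, o)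
        = (r ++ (q.map PySem.Chars.strip).filter (fun p => !(p == []) && !(pvIsOpt p)),
           o ++ (q.map PySem.Chars.strip).filter (fun p => !(p == []) && pvIsOpt p)) := by
  induction q with
  | nil => intro r o; simp
  | cons p q ih =>
      intro r o
      rw [List.foldl_cons]
      by_cases he : PySem.Chars.strip p = []
      · have hstep : pvStepPartA (r, o) p = (r, o) := by simp [pvStepPartA, he]
        rw [hstep, ih r o]
        simp [he]
      · cases ho : pvIsOpt (PySem.Chars.strip p) with
        | true =>
            have hstep : pvStepPartA (r, o) p = (r, o ++ [PySem.Chars.strip p]) := by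
              simp [pvStepPartA, he, ho]
            rw [hstep, ih r (o ++ [PySem.Chars.strip p])]
            simp [he, ho, List.append_assoc]
        | false =>
            have hstep : pvStepPartA (r, o) p = (r ++ [PySem.Chars.strip p], o) := by
              simp [pvStepPartA, he, ho]
            rw [hstep, ih (r ++ [PySem.Chars.strip p]) o]
            simp [he, ho, List.append_assoc]

-- ---------- B side: splitOn [','] is a clean structural comma split ----------

-- prepend a prefix onto the first element (total; [p] on the empty list)
def pvConsHead (p : List Char) : List (List Char) → List (List Char)
  | [] => [p]
  | h :: t => (p ++ h) :: t

-- the clean comma split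
def pvSplitC : List Char → List (List Char)
  | [] => [[]]
  | c :: s => if c = ',' then [] :: pvSplitC s else pvConsHead [c] (pvSplitC s)

lemma pvConsHead_consHead (a b : List Char) (l : List (List Char)) :
    pvConsHead a (pvConsHead b l) = pvConsHead (a ++ b) l := by
  cases l <;> simp [pvConsHead]

lemma pvSplitC_ne (s : List Char) : pvSplitC s ≠ [] := by
  induction s with
  | nil => simp [pvSplitC]
  | cons c s ih =>
      by_cases h : c = ','
      · simp [pvSplitC, h]
      · cases hs : pvSplitC s with
        | nil => exact absurd hs ih
        | cons a t => simp [pvSplitC, h, hs, pvConsHead]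

lemma pvConsHead_nil (l : List (List Char)) (h : l ≠ []) : pvConsHead [] l = l := by
  cases l with
  | nil => exact absurd rfl h
  | cons a t => simp [pvConsHead]

lemma pv_splitOn_go (s : List Char) :
    ∀ (fuel : Nat) (cur : List Char) (acc : List (List Char)), s.length ≤ fuel →
      PySem.Chars.splitOn.go [','] fuel s cur acc
        = acc.reverse ++ pvConsHead cur.reverse (pvSplitC s) := by
  induction s with
  | nil =>
      intro fuel cur acc _
      cases fuel <;> simp [PySem.Chars.splitOn.go, pvSplitC, pvConsHead]
  | cons c s ih =>
      intro fuel cur acc hf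
      cases fuel with
      | zero => simp at hf
      | succ f =>
          have hf' : s.length ≤ f := by simp at hf; omega
          by_cases h : c = ','
          · subst h
            have hpre : List.isPrefixOf [','] (',' :: s) = true := by
              simp [List.isPrefixOf]
            rw [show PySem.Chars.splitOn.go [','] (f + 1) (',' :: s) cur acc
                  = PySem.Chars.splitOn.go [','] f (List.drop 1 (',' :: s)) [] (cur.reverse :: acc) by
                simp [PySem.Chars.splitOn.go, hpre]]
            simp only [List.drop_one, List.tail_cons]
            rw [ih f [] (cur.reverse :: acc) hf']
            simp only [List.reverse_nil]
            rw [pvConsHead_nil _ (pvSplitC_ne s)]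
            simp [pvSplitC, pvConsHead]
          · have hpre : List.isPrefixOf [','] (c :: s) = false := by
              simp [List.isPrefixOf]
              exact fun hc => absurd hc.symm h
            rw [show PySem.Chars.splitOn.go [','] (f + 1) (c :: s) cur acc
                  = PySem.Chars.splitOn.go [','] f s (c :: cur) acc by
                simp [PySem.Chars.splitOn.go, hpre]]
            rw [ih f (c :: cur) acc hf']
            simp [pvSplitC, h, pvConsHead_consHead]

lemma pv_splitOn_comma (s : List Char) :
    PySem.Chars.splitOn s [','] = pvSplitC s := by
  unfold PySem.Chars.splitOn
  rw [pv_splitOn_go s (s.length + 1) [] [] (by omega)]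
  simp [pvConsHead_nil _ (pvSplitC_ne s)]

-- Chars.count for a single character is List.count
lemma pv_count_go (c : Char) (s : List Char) :
    ∀ (fuel acc : Nat), s.length ≤ fuel →
      PySem.Chars.count.go [c] fuel s acc = acc + s.count c := by
  induction s with
  | nil => intro fuel acc _; cases fuel <;> simp [PySem.Chars.count.go]
  | cons h t ih =>
      intro fuel acc hf
      cases fuel with
      | zero => simp at hf
      | succ f =>
          have hf' : t.length ≤ f := by simp at hf; omega
          by_cases hc : c = h
          · subst hc
            have hpre : List.isPrefixOf [c] (c :: t) = true := by simp [List.isPrefixOf]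
            rw [show PySem.Chars.count.go [c] (f + 1) (c :: t) acc
                  = PySem.Chars.count.go [c] f (List.drop 1 (c :: t)) (acc + 1) by
                simp [PySem.Chars.count.go, hpre]]
            simp only [List.drop_one, List.tail_cons]
            rw [ih f (acc + 1) hf']
            simp
            omega
          · have hpre : List.isPrefixOf [c] (h :: t) = false := by
              simp [List.isPrefixOf]
              exact fun hx => absurd hx hc
            rw [show PySem.Chars.count.go [c] (f + 1) (h :: t) acc
                  = PySem.Chars.count.go [c] f t acc by
                simp [PySem.Chars.count.go, hpre]]
            rw [ih f acc hf']
            simp [List.count_cons]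
            intro hx; exact absurd hx.symm hc

lemma pv_count_single (s : List Char) (c : Char) :
    PySem.Chars.count s [c] = s.count c := by
  unfold PySem.Chars.count
  simp only [List.isEmpty_cons, Bool.false_eq_true, if_false]
  simpa using pv_count_go c s s.length 0 le_rfl

-- paren balance of a char list
def pvBal (l : List Char) : Int := (l.count '(' : Int) - (l.count ')' : Int)

lemma pvBal_nil : pvBal [] = 0 := by simp [pvBal]

def pvBufL : Option (List Char) → List Char
  | none => []
  | some b => b

def pvMerge (buf : Option (List Char)) (p : List Char) : List Char :=
  match buf with
  | none => p
  | some b => b ++ ',' :: p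

lemma pv_count_singleton (a c : Char) :
    List.count a [c] = if c = a then 1 else 0 := by
  simp [List.count_cons]

lemma pv_bal_snoc (u : List Char) (c : Char) :
    pvBal (u ++ [c]) = if c = '(' then pvBal u + 1 else if c = ')' then pvBal u - 1 else pvBal u := by
  unfold pvBal
  simp only [List.count_append, pv_count_singleton]
  by_cases h1 : c = '('
  · subst h1
    rw [if_pos rfl, if_pos rfl, if_neg (by decide)]
    push_cast
    ring
  · rw [if_neg h1, if_neg h1]
    by_cases h2 : c = ')'
    · subst h2
      rw [if_pos rfl, if_pos rfl]
      push_cast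
      ring
    · rw [if_neg h2, if_neg h2]
      push_cast
      ring

-- the fragment step from a coherent state commits or extends the merged buffer
lemma pv_step_merge (p : List Char) (ch : List (List Char)) (buf : Option (List Char)) :
    pvStepFragB (ch, buf, pvBal (pvBufL buf)) p
      = if pvBal (pvMerge buf p) = 0
          then (ch ++ [pvMerge buf p], none, pvBal (pvMerge buf p))
          else (ch, some (pvMerge buf p), pvBal (pvMerge buf p)) := by
  cases buf with
  | none =>
      have e : pvBal (pvBufL (none : Option (List Char)))
            + ((List.count '(' p : Int)) - ((List.count ')' p : Int)) = pvBal p := by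
        simp [pvBufL, pvBal]
      simp only [pvStepFragB, pv_count_single]
      simp only [pvMerge]
      rw [e]
  | some b =>
      have e : pvBal (pvBufL (some b))
            + ((List.count '(' p : Int)) - ((List.count ')' p : Int)) = pvBal (b ++ ',' :: p) := by
        simp [pvBufL, pvBal, List.count_append]
        ring
      simp only [pvStepFragB, pv_count_single]
      simp only [pvMerge]
      rw [e]

-- B's fragment fold over the clean split equals the reference chunker
lemma pv_frag_fold (s : List Char) :
    ∀ (p : List Char) (ch : List (List Char)) (buf : Option (List Char)),
      (let st := (pvConsHead p (pvSplitC s)).foldl pvStepFragB (ch, buf, pvBal (pvBufL buf));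
       st.1 ++ (match st.2.1 with | none => [] | some b => [b]))
        = ch ++ pvChunks s (pvBal (pvMerge buf p)) (pvMerge buf p) := by
  induction s with
  | nil =>
      intro p ch buf
      simp only [pvSplitC, pvConsHead, List.append_nil, List.foldl_cons, List.foldl_nil,
        pv_step_merge]
      by_cases h0 : pvBal (pvMerge buf p) = 0
      · rw [if_pos h0]
        simp [pvChunks, pvChunksP]
      · rw [if_neg h0]
        simp [pvChunks, pvChunksP]
  | cons c s ih =>
      intro p ch buf
      by_cases h : c = ','
      · subst h
        have hsplit : pvConsHead p (pvSplitC (',' :: s)) = p :: pvSplitC s := by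
          simp [pvSplitC, pvConsHead]
        rw [hsplit, List.foldl_cons, pv_step_merge]
        by_cases h0 : pvBal (pvMerge buf p) = 0
        · rw [if_pos h0]
          dsimp only
          have hchunks : pvChunks (',' :: s) (pvBal (pvMerge buf p)) (pvMerge buf p)
              = pvMerge buf p :: pvChunks s 0 [] := by
            simp only [pvChunks, pvChunksP]
            rw [if_pos ⟨trivial, h0⟩]
            rw [h0]
            simp
          rw [hchunks]
          rw [h0]
          have h2 := ih [] (ch ++ [pvMerge buf p]) none
          rw [pvConsHead_nil _ (pvSplitC_ne s)] at h2
          have hmn : pvMerge (none : Option (List Char)) [] = ([] : List Char) := rfl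
          rw [hmn, pvBal_nil] at h2
          have hb0 : pvBal (pvBufL (none : Option (List Char))) = 0 := by
            simp [pvBufL, pvBal]
          rw [hb0] at h2
          dsimp only at h2
          rw [h2]
          simp
        · rw [if_neg h0]
          dsimp only
          have hchunks : pvChunks (',' :: s) (pvBal (pvMerge buf p)) (pvMerge buf p)
              = pvChunks s (pvBal (pvMerge buf p)) (pvMerge buf p ++ [',']) := by
            simp only [pvChunks, pvChunksP]
            rw [if_neg (by intro hx; exact h0 hx.2)]
            simp
          rw [hchunks]
          have h2 := ih [] ch (some (pvMerge buf p))
          rw [pvConsHead_nil _ (pvSplitC_ne s)] at h2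
          rw [show pvMerge (some (pvMerge buf p)) [] = pvMerge buf p ++ [','] from rfl] at h2
          rw [show pvBufL (some (pvMerge buf p)) = pvMerge buf p from rfl] at h2
          have hb2 : pvBal (pvMerge buf p ++ [',']) = pvBal (pvMerge buf p) := by
            rw [pv_bal_snoc]; simp
          rw [hb2] at h2
          dsimp only at h2
          exact h2
      · have hsplit : pvConsHead p (pvSplitC (c :: s))
            = pvConsHead (p ++ [c]) (pvSplitC s) := by
          simp [pvSplitC, h, pvConsHead_consHead]
        rw [hsplit]
        have h2 := ih (p ++ [c]) ch buf
        have hm : pvMerge buf (p ++ [c]) = pvMerge buf p ++ [c] := by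
          cases buf <;> simp [pvMerge]
        rw [hm] at h2
        dsimp only at h2 ⊢
        rw [h2]
        have hchunks : pvChunks (c :: s) (pvBal (pvMerge buf p)) (pvMerge buf p)
            = pvChunks s (if c = '(' then pvBal (pvMerge buf p) + 1
                          else if c = ')' then pvBal (pvMerge buf p) - 1
                          else pvBal (pvMerge buf p)) (pvMerge buf p ++ [c]) := by
          simp only [pvChunks, pvChunksP]
          rw [if_neg (by intro hx; exact h hx.1)]
        rw [hchunks, ← pv_bal_snoc]

-- a stable sort by a 0/1 key is the partition
lemma pv_insert_zero {α : Type} (b : α → Bool) (x : α) (hx : b x = false) :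
    ∀ (f0 f1 : List α), (∀ y ∈ f0, b y = false) → (∀ y ∈ f1, b y = true) →
      PySem.List.insertBy
        (fun a a' => decide ((if b a then (1:Int) else 0) < (if b a' then 1 else 0))) x (f0 ++ f1)
        = (f0 ++ [x]) ++ f1 := by
  intro f0
  induction f0 with
  | nil =>
      intro f1 _ h1
      cases f1 with
      | nil => simp [PySem.List.insertBy]
      | cons z zs =>
          have hz : b z = true := h1 z (by simp)
          simp [PySem.List.insertBy, hx, hz]
  | cons y f0 ih =>
      intro f1 h0 h1
      have hy : b y = false := h0 y (by simp)
      simp only [List.cons_append, PySem.List.insertBy, hx, hy]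
      simp only [decide_eq_true_eq]
      rw [if_neg (by omega)]
      rw [ih f1 (fun z hz => h0 z (by simp [hz])) h1]

lemma pv_insert_one {α : Type} (b : α → Bool) (x : α) (hx : b x = true)
    (l : List α) :
    PySem.List.insertBy
      (fun a a' => decide ((if b a then (1:Int) else 0) < (if b a' then 1 else 0))) x l
      = l ++ [x] := by
  apply PySem.List.insertBy_of_forall_not_before
  intro y _
  simp only [hx]
  split_ifs <;> decide

lemma pv_foldl_ins {α : Type} (b : α → Bool) (r : List α) :
    ∀ (f0 f1 : List α), (∀ y ∈ f0, b y = false) → (∀ y ∈ f1, b y = true) →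
      r.foldl (fun acc x => PySem.List.insertBy
          (fun a a' => decide ((if b a then (1:Int) else 0) < (if b a' then 1 else 0))) x acc)
        (f0 ++ f1)
        = (f0 ++ r.filter (fun x => !(b x))) ++ (f1 ++ r.filter b) := by
  induction r with
  | nil => intro f0 f1 _ _; simp
  | cons x r ih =>
      intro f0 f1 h0 h1
      simp only [List.foldl_cons, List.filter_cons]
      by_cases hx : b x = true
      · rw [pv_insert_one b x hx (f0 ++ f1)]
        rw [List.append_assoc]
        rw [ih f0 (f1 ++ [x]) h0 (by intro y hy; rcases List.mem_append.mp hy with h | h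
                                     · exact h1 y h
                                     · simp at h; subst h; exact hx)]
        simp [hx]
      · have hx' : b x = false := by simpa using hx
        rw [pv_insert_zero b x hx' f0 f1 h0 h1]
        rw [ih (f0 ++ [x]) f1 (by intro y hy; rcases List.mem_append.mp hy with h | h
                                  · exact h0 y h
                                  · simp at h; subst h; exact hx') h1]
        simp [hx']

lemma pv_sorted_binary {α : Type} (b : α → Bool) (r : List α) :
    PySem.List.sorted r (fun x => if b x then (1:Int) else 0) false
      = r.filter (fun x => !(b x)) ++ r.filter b := by
  rw [PySem.List.sorted_eq_foldl_insertBy]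
  have := pv_foldl_ins b r [] [] (by simp) (by simp)
  simpa using this

-- the tail of both programs agrees for every params string
lemma pv_map_strip_strip (l : List (List Char)) :
    l.map (PySem.Chars.strip ∘ PySem.Chars.strip) = l.map PySem.Chars.strip :=
  List.map_congr_left (fun a _ => pv_strip_strip a)

lemma pv_tail_eq (s : List Char) :
    ((if PySem.Chars.strip (s.foldl pvStepSplitA ([], [], 0)).2.1 ≠ []
        then (s.foldl pvStepSplitA ([], [], 0)).1
              ++ [PySem.Chars.strip (s.foldl pvStepSplitA ([], [], 0)).2.1]
        else (s.foldl pvStepSplitA ([], [], 0)).1).foldl pvStepPartA ([], [])).1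
      ++ ((if PySem.Chars.strip (s.foldl pvStepSplitA ([], [], 0)).2.1 ≠ []
        then (s.foldl pvStepSplitA ([], [], 0)).1
              ++ [PySem.Chars.strip (s.foldl pvStepSplitA ([], [], 0)).2.1]
        else (s.foldl pvStepSplitA ([], [], 0)).1).foldl pvStepPartA ([], [])).2
      = PySem.List.sorted
          (((let st := (PySem.Chars.splitOn s [',']).foldl pvStepFragB ([], none, 0);
             st.1 ++ (match st.2.1 with | none => [] | some b => [b])).map
              PySem.Chars.strip).filter (fun p => !(p == [])))
          pvOptKey false := by
  have hA := pv_A_fold s [] [] 0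
  have h1 : (s.foldl pvStepSplitA ([], [], 0)).1
      = (pvChunksP s 0 []).1.map PySem.Chars.strip := by
    have := congrArg Prod.fst hA; simpa using this
  have h2 : (s.foldl pvStepSplitA ([], [], 0)).2.1 = (pvChunksP s 0 []).2 := by
    have := congrArg Prod.snd hA; simpa using this
  have hB : (let st := (PySem.Chars.splitOn s [',']).foldl pvStepFragB ([], none, 0);
             st.1 ++ (match st.2.1 with | none => [] | some b => [b]))
      = pvChunks s 0 [] := by
    rw [pv_splitOn_comma]
    have := pv_frag_fold s [] [] none
    rw [pvConsHead_nil _ (pvSplitC_ne s)] at this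
    simpa [pvMerge, pvBufL, pvBal] using this
  rw [h1, h2, hB]
  rw [pv_part_filters]
  have hkey : pvOptKey = fun p => if pvIsOpt p then (1:Int) else 0 := rfl
  rw [hkey, pv_sorted_binary]
  unfold pvChunks
  by_cases h : PySem.Chars.strip (pvChunksP s 0 []).2 = []
  · simp [h, pv_map_strip_strip, List.filter_append, List.filter_filter, Bool.and_comm]
  · cases hop : pvIsOpt (PySem.Chars.strip (pvChunksP s 0 []).2) <;>
      simp [h, hop, pv_map_strip_strip, pv_strip_strip, List.filter_append, List.filter_filter,
            List.map_append, List.append_assoc, Bool.and_comm]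

-- ===== VERDICT (by name: the statement is the Claim_ definition above) =====
theorem fix_function_signature_spec : Claim_equal_fix_function_signature := by
  intro line _
  unfold Spec_fix_function_signature
  unfold fix_function_signature fix_function_signature_alt
  by_cases hg : (PySem.Chars.isIn ['d','e','f',' '] line.toList
      && PySem.Chars.isIn ['('] line.toList && PySem.Chars.isIn [')'] line.toList) = true
  · have hcomp := hg
    simp only [Bool.and_eq_true] at hcomp
    obtain ⟨⟨hd, hp⟩, hq⟩ := hcomp
    have hfind : PySem.Chars.find line.toList ['('] ≠ -1 := by
      simpa [PySem.Chars.isIn, bne_iff_ne] using hp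
    have hrfind : PySem.Chars.rfind line.toList [')'] ≠ -1 :=
      pv_rfind_ne_neg_one line.toList [')'] hq
    simp only [hg, Bool.not_true, Bool.false_eq_true, if_false]
    rw [if_neg (not_or.mpr ⟨hfind, hrfind⟩)]
    simp only [PySem.Chars.slice_eq_listSlice]
    by_cases hs : PySem.Chars.strip (PySem.List.slice line.toList
        (some (PySem.Chars.find line.toList ['('] + 1))
        (some (PySem.Chars.rfind line.toList [')']))) = []
    · rw [if_pos hs, if_pos hs]
    · rw [if_neg hs, if_neg hs]
      apply congrArg String.ofList
      rw [pv_tail_eq]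
  · simp only [Bool.not_eq_true] at hg
    simp [hg]
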